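-- pv_equiv track=rewrite | github.com/Darkduv/Project-Euler | Project Euler/Problems_120_to_139.py | non_fac
-- ===== SOURCE A (Python) =====
-- def non_fac(p):
--     nb = 1
--     k = 1
--     nb %= p
--     while nb != 0:
--         k += 1
--         nb *= 10
--         nb += 1
--         nb %= p
--     while k % 2 == 0:
--         k //= 2
--     while k % 5 == 0:
--         k //= 5
--     return k != 1
-- ===== SOURCE B (Python) =====
-- def non_fac(p):
--     # Track powers of 10 modulo 9*|p| instead of repunits modulo p:
--     # p | repunit(k) iff 10**k == 1 (mod 9*|p|).  The final strip-2s/5s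
--     # loops collapse into one divisibility test against 10**40.
--     m = 9 * abs(p)
--     t = 10 % m
--     k = 1
--     while t != 1:
--         t = t * 10 % m
--         k += 1
--     return 10 ** 40 % k != 0
-- ===== Notes on version B (the rewrite author's own statement) =====
-- stated objective: alternative
-- what changed: B searches for the repunit length by tracking powers of 10 modulo 9*|p| (a different maintained state/modulus) instead of repunits modulo p, and replaces A's two strip-2s/strip-5s division loops by a single divisibility test of 10**40 by k.
-- outside the precondition, e.g. on non_fac(0): A raises ZeroDivisionError, B raises ZeroDivisionError
import Mathlib
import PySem

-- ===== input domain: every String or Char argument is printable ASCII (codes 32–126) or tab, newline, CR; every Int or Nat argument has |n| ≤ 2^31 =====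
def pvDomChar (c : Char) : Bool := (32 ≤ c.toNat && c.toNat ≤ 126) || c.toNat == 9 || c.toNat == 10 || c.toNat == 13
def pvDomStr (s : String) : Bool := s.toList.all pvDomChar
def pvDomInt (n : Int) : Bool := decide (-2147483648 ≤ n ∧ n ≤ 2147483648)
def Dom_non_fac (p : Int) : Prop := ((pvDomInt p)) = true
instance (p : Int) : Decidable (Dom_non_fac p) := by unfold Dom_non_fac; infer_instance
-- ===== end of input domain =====

-- B tracks powers of 10 modulo 9*|p| instead of repunits modulo p, and replaces
-- A's two strip-2s/strip-5s loops by one divisibility test; different structure, equal cost.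

-- ===== PORT A =====
-- while nb != 0: k += 1; nb = (nb*10+1) % p   (fuel only bounds the iteration
-- count; it is never exhausted on inputs satisfying Pre_non_fac)
def repLoop (p : Int) : Nat → Int → Int → Int
  | 0, _, k => k
  | f + 1, nb, k =>
    if nb ≠ 0 then repLoop p f (PySem.Int.mod (nb * 10 + 1) p) (k + 1) else k

-- while k % d == 0: k //= d
def stripLoop (d : Int) : Nat → Int → Int
  | 0, k => k
  | f + 1, k =>
    if PySem.Int.mod k d = 0 then stripLoop d f (PySem.Int.floordiv k d) else k

def non_fac (p : Int) : Bool :=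
  let nb := PySem.Int.mod 1 p
  let k := repLoop p (9 * p.natAbs + 1) nb 1
  let k2 := stripLoop 2 (k.natAbs + 1) k
  let k5 := stripLoop 5 (k2.natAbs + 1) k2
  decide (k5 ≠ 1)

-- ===== PORT B =====
-- while t != 1: t = t * 10 % m; k += 1
def powLoop (m : Int) : Nat → Int → Int → Int
  | 0, _, k => k
  | f + 1, t, k =>
    if t ≠ 1 then powLoop m f (PySem.Int.mod (t * 10) m) (k + 1) else k

def non_fac_alt (p : Int) : Bool :=
  let m : Int := 9 * |p|
  let t := PySem.Int.mod 10 m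
  let k := powLoop m (m.natAbs + 1) t 1
  decide (PySem.Int.mod (10 ^ 40) k ≠ 0)

-- ===== PRECONDITION & SPEC =====
-- A raises ZeroDivisionError at p = 0 and loops forever when 2 or 5 divides p
-- (no repunit is divisible by such p); Pre_ admits exactly the inputs on which
-- A returns.
def Pre_non_fac (p : Int) : Prop := p ≠ 0 ∧ ¬ (2 ∣ p) ∧ ¬ (5 ∣ p)
instance (p : Int) : Decidable (Pre_non_fac p) := by unfold Pre_non_fac; infer_instance
def pvWitness_non_fac : Int := 7

def Spec_non_fac (p : Int) (out : Bool) : Prop := out = non_fac_alt p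
instance (p : Int) (out : Bool) : Decidable (Spec_non_fac p out) := by unfold Spec_non_fac; infer_instance

-- ===== CLAIM (what is proved, stated in full; the proofs are below) =====
def Claim_equal_non_fac : Prop := ∀ (p : Int), Dom_non_fac p → Pre_non_fac p → Spec_non_fac p (non_fac p)

-- ===== LEMMAS AND PROOFS =====

lemma pymod_bounds (x p : Int) (hp : p ≠ 0) :
    -|p| < PySem.Int.mod x p ∧ PySem.Int.mod x p < |p| := by
  rcases lt_or_gt_of_ne hp with h | h
  · have := PySem.Int.mod_neg_bounds x h
    rw [abs_of_neg h]; omega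
  · have h1 := PySem.Int.mod_nonneg x h
    have h2 := PySem.Int.mod_lt x h
    rw [abs_of_pos h]; omega

lemma pymod_emod (x p : Int) : PySem.Int.mod x p % |p| = x % |p| := by
  have hd := PySem.Int.floordiv_mul_add_mod x p
  have h1 : PySem.Int.mod x p = x - PySem.Int.floordiv x p * p := by omega
  have h2 : |p| ∣ PySem.Int.floordiv x p * p := Dvd.dvd.mul_left ((abs_dvd p p).mpr dvd_rfl) _
  rw [h1, Int.sub_emod, Int.emod_eq_zero_of_dvd h2, sub_zero, Int.emod_emod_of_dvd _ dvd_rfl]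

-- one step of the two loops, arithmetically: B's next state from A's next residue
lemma step_arith (q u : Int) (hq : 0 < q) :
    (10 * (9 * u + 1)) % (9 * q) = 9 * ((10 * u + 1) % q) + 1 := by
  set v := (10 * u + 1) % q with hv
  have hv0 : 0 ≤ v := Int.emod_nonneg _ (by omega)
  have hv1 : v < q := Int.emod_lt_of_pos _ hq
  have hdecomp : q * ((10 * u + 1) / q) + v = 10 * u + 1 := Int.mul_ediv_add_emod _ _
  have h1 : 10 * (9 * u + 1) = (9 * v + 1) + (9 * q) * ((10 * u + 1) / q) := by
    linear_combination (-9) * hdecomp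
  rw [h1, Int.add_mul_emod_self_left, Int.emod_eq_of_lt (by omega) (by omega)]

-- The two main loops agree step for step: with q = |p|, B's state t is always
-- 9 * (nb % q) + 1 where nb is A's state (a Python-reduced residue, |nb| < q).
lemma loop_eq (p : Int) (hp : p ≠ 0) :
    ∀ (f : Nat) (nb t k : Int), -|p| < nb → nb < |p| → t = 9 * (nb % |p|) + 1 →
      repLoop p f nb k = powLoop (9 * |p|) f t k := by
  have hq : 0 < |p| := abs_pos.mpr hp
  intro f
  induction f with
  | zero => intro nb t k _ _ _; rfl
  | succ f ih =>
    intro nb t k hb1 hb2 ht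
    by_cases h0 : nb = 0
    · subst h0
      have : t = 1 := by simp [ht]
      simp [repLoop, powLoop, this]
    · have hmod0 : nb % |p| ≠ 0 := by
        intro h
        exact h0 (Int.eq_zero_of_abs_lt_dvd ((PySem.Int.emod_eq_zero_iff_dvd nb |p|).mp h)
          (abs_lt.mpr ⟨by omega, hb2⟩))
      have hu0 : 0 ≤ nb % |p| := Int.emod_nonneg _ (by omega)
      have ht1 : t ≠ 1 := by omega
      rw [repLoop, powLoop, if_pos h0, if_pos ht1]
      apply ih
      · exact (pymod_bounds _ _ hp).1
      · exact (pymod_bounds _ _ hp).2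
      · have hm : PySem.Int.mod (t * 10) (9 * |p|) = (t * 10) % (9 * |p|) :=
          PySem.Int.mod_eq_emod_of_pos (by omega)
        rw [hm, pymod_emod (nb * 10 + 1) p, ht]
        have := step_arith |p| (nb % |p|) hq
        have hcong : (nb * 10 + 1) % |p| = (10 * (nb % |p|) + 1) % |p| := by
          conv_lhs => rw [show nb * 10 + 1 = 10 * nb + 1 by ring]
          conv_lhs => rw [Int.add_emod, Int.mul_emod]
          conv_rhs => rw [Int.add_emod, Int.mul_emod, Int.emod_emod_of_dvd nb dvd_rfl]
        rw [hcong, show (9 * (nb % |p|) + 1) * 10 = 10 * (9 * (nb % |p|) + 1) from by ring]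
        exact this

lemma repLoop_bounds (p : Int) :
    ∀ (f : Nat) (nb k : Int), k ≤ repLoop p f nb k ∧ repLoop p f nb k ≤ k + f := by
  intro f
  induction f with
  | zero => intro nb k; simp [repLoop]
  | succ f ih =>
    intro nb k
    rw [repLoop]
    split
    · have := ih (PySem.Int.mod (nb * 10 + 1) p) (k + 1)
      omega
    · omega

lemma strip_pos_factor (d : Int) (hd : 2 ≤ d) :
    ∀ (f : Nat) (k : Int), 1 ≤ k →
      1 ≤ stripLoop d f k ∧ ∃ a : Nat, k = d ^ a * stripLoop d f k := by
  intro f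
  induction f with
  | zero => intro k hk; exact ⟨hk, 0, by simp [stripLoop]⟩
  | succ f ih =>
    intro k hk
    rw [stripLoop]
    split
    · rename_i h
      have hdvd : d ∣ k := (PySem.Int.mod_eq_zero_iff_dvd k d).mp h
      have hfd : PySem.Int.floordiv k d = k / d := PySem.Int.floordiv_eq_ediv_of_pos (by omega)
      have hmul : d * (k / d) = k := Int.mul_ediv_cancel' hdvd
      have hk' : 1 ≤ k / d := by
        rw [Int.le_ediv_iff_mul_le (by omega : (0:Int) < d), one_mul]
        exact Int.le_of_dvd (by omega) hdvd
      obtain ⟨h1, a, ha⟩ := ih _ (hfd ▸ hk')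
      refine ⟨h1, a + 1, ?_⟩
      rw [pow_succ]
      rw [hfd] at ha ⊢
      nlinarith [ha, hmul]
    · exact ⟨hk, 0, by simp⟩

lemma strip_not_dvd (d : Int) (hd : 2 ≤ d) :
    ∀ (f : Nat) (k : Int), 1 ≤ k → k ≤ (f : Int) → ¬ d ∣ stripLoop d f k := by
  intro f
  induction f with
  | zero => intro k hk hf; omega
  | succ f ih =>
    intro k hk hf
    rw [stripLoop]
    split
    · rename_i h
      have hdvd : d ∣ k := (PySem.Int.mod_eq_zero_iff_dvd k d).mp h
      have hfd : PySem.Int.floordiv k d = k / d := PySem.Int.floordiv_eq_ediv_of_pos (by omega)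
      have hmul : d * (k / d) = k := Int.mul_ediv_cancel' hdvd
      have hk' : 1 ≤ k / d := by
        rw [Int.le_ediv_iff_mul_le (by omega : (0:Int) < d), one_mul]
        exact Int.le_of_dvd (by omega) hdvd
      have hle : k / d ≤ (f : Int) := by
        have : 2 * (k / d) ≤ d * (k / d) := by nlinarith
        push_cast at hf ⊢
        omega
      rw [hfd]
      exact ih _ hk' hle
    · rename_i h
      exact fun hdvd => h ((PySem.Int.mod_eq_zero_iff_dvd k d).mpr hdvd)

-- A's tail (strip all 2s, then all 5s, test ≠ 1) answers exactly "k ∤ 10^40"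
lemma strip25_eq_one_iff (k : Int) (h1 : 1 ≤ k) (h2 : k ≤ 2 ^ 40) :
    (stripLoop 5 ((stripLoop 2 (k.natAbs + 1) k).natAbs + 1) (stripLoop 2 (k.natAbs + 1) k) = 1)
      ↔ k ∣ 10 ^ 40 := by
  set k2 := stripLoop 2 (k.natAbs + 1) k with hk2
  obtain ⟨hk2pos, a, ha⟩ := strip_pos_factor 2 (by norm_num) (k.natAbs + 1) k h1
  rw [← hk2] at hk2pos ha
  set k5 := stripLoop 5 (k2.natAbs + 1) k2 with hk5
  obtain ⟨hk5pos, b, hb⟩ := strip_pos_factor 5 (by norm_num) (k2.natAbs + 1) k2 hk2pos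
  rw [← hk5] at hk5pos hb
  have hnd2 : ¬ (2 ∣ k2) := strip_not_dvd 2 (by norm_num) (k.natAbs + 1) k h1 (by omega)
  have hnd5 : ¬ (5 ∣ k5) := strip_not_dvd 5 (by norm_num) (k2.natAbs + 1) k2 hk2pos (by omega)
  have hnd2' : ¬ (2 ∣ k5) := fun h => hnd2 (hb ▸ dvd_mul_of_dvd_right h _)
  constructor
  · intro h5
    rw [h5, mul_one] at hb
    rw [hb] at ha
    have haa : a ≤ 40 := by
      by_contra hgt
      have h41 : (2:Int) ^ 41 ≤ 2 ^ a := pow_le_pow_right₀ (by norm_num) (by omega)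
      have : (2:Int) ^ a ≤ 2 ^ 40 := by
        calc (2:Int) ^ a ≤ 2 ^ a * 5 ^ b :=
              le_mul_of_one_le_right (by positivity) (one_le_pow₀ (by norm_num))
        _ = k := ha.symm
        _ ≤ 2 ^ 40 := h2
      norm_num at this h41
      omega
    have hbb : b ≤ 40 := by
      by_contra hgt
      have h41 : (5:Int) ^ 41 ≤ 5 ^ b := pow_le_pow_right₀ (by norm_num) (by omega)
      have : (5:Int) ^ b ≤ 2 ^ 40 := by
        calc (5:Int) ^ b ≤ 2 ^ a * 5 ^ b :=
              le_mul_of_one_le_left (by positivity) (one_le_pow₀ (by norm_num))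
        _ = k := ha.symm
        _ ≤ 2 ^ 40 := h2
      norm_num at this h41
      omega
    rw [ha, show (10:Int) ^ 40 = 2 ^ 40 * 5 ^ 40 from by
      rw [show (10:Int) = 2 * 5 from by norm_num, mul_pow]]
    exact mul_dvd_mul (pow_dvd_pow 2 haa) (pow_dvd_pow 5 hbb)
  · intro hk
    have hk5k : k5 ∣ k := by
      rw [ha, hb]
      exact Dvd.dvd.mul_left (Dvd.dvd.mul_left dvd_rfl _) _
    have hk510 : k5 ∣ 10 ^ 40 := hk5k.trans hk
    set n : Nat := k5.toNat with hn
    have hkn : k5 = (n : Int) := by omega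
    have hn10 : n ∣ 10 ^ 40 := by
      have : (n : Int) ∣ ((10 ^ 40 : Nat) : Int) := by push_cast; rw [← hkn]; exact hk510
      exact_mod_cast this
    have hn2 : ¬ (2 ∣ n) := by
      intro h
      exact hnd2' (by rw [hkn]; exact_mod_cast Int.natCast_dvd_natCast.mpr h)
    have hn5 : ¬ (5 ∣ n) := by
      intro h
      exact hnd5 (by rw [hkn]; exact_mod_cast Int.natCast_dvd_natCast.mpr h)
    have hcop : Nat.Coprime n 10 := by
      have c2 : Nat.Coprime n 2 := ((Nat.Prime.coprime_iff_not_dvd Nat.prime_two).mpr hn2).symm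
      have c5 : Nat.Coprime n 5 := ((Nat.Prime.coprime_iff_not_dvd Nat.prime_five).mpr hn5).symm
      have := Nat.Coprime.mul_right c2 c5
      simpa using this
    have : n = 1 := Nat.Coprime.eq_one_of_dvd (Nat.Coprime.pow_right 40 hcop) hn10
    rw [hkn, this, Nat.cast_one]

-- ===== VERDICT (by name: the statement is the Claim_ definition above) =====
theorem non_fac_spec : Claim_equal_non_fac := by
  unfold Claim_equal_non_fac
  intro p hdom hpre
  obtain ⟨hp0, hd2, hd5⟩ := hpre
  have hq : 0 < |p| := abs_pos.mpr hp0
  unfold Spec_non_fac non_fac non_fac_alt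
  simp only []
  have hfuel : (9 * |p|).natAbs + 1 = 9 * p.natAbs + 1 := by
    rw [Int.natAbs_mul, Int.natAbs_abs]
    rfl
  have hinit : PySem.Int.mod 10 (9 * |p|) = 9 * (PySem.Int.mod 1 p % |p|) + 1 := by
    rw [PySem.Int.mod_eq_emod_of_pos (by omega), pymod_emod 1 p]
    by_cases h1 : |p| = 1
    · rw [h1]; norm_num
    · rw [Int.emod_eq_of_lt (by norm_num) (by omega),
        Int.emod_eq_of_lt (by norm_num) (by omega)]
      norm_num
  have hloop : repLoop p (9 * p.natAbs + 1) (PySem.Int.mod 1 p) 1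
      = powLoop (9 * |p|) ((9 * |p|).natAbs + 1) (PySem.Int.mod 10 (9 * |p|)) 1 := by
    rw [hfuel]
    exact loop_eq p hp0 _ _ _ 1 (pymod_bounds 1 p hp0).1 (pymod_bounds 1 p hp0).2 hinit
  rw [← hloop]
  set kk := repLoop p (9 * p.natAbs + 1) (PySem.Int.mod 1 p) 1 with hkk
  have hb := repLoop_bounds p (9 * p.natAbs + 1) (PySem.Int.mod 1 p) 1
  rw [← hkk] at hb
  have hk1 : 1 ≤ kk := hb.1
  have hk40 : kk ≤ 2 ^ 40 := by
    have hdom' : p.natAbs ≤ 2147483648 := by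
      unfold Dom_non_fac pvDomInt at hdom
      simp only [decide_eq_true_eq] at hdom
      omega
    have : (2:Int) ^ 40 = 1099511627776 := by norm_num
    omega
  simp only [decide_eq_decide]
  rw [ne_eq, ne_eq, strip25_eq_one_iff kk hk1 hk40, PySem.Int.mod_eq_zero_iff_dvd]
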